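-- pv_equiv track=rewrite | github.com/Big-Buddy/comp472-miniproject1 | main.py | manh_dist
-- ===== SOURCE A (Python) =====
-- def manh_dist(state):
-- 	"""
-- 	First heuristic function, computes the Manhattan distance in terms of the array indices as x-y coordinates
-- 	"""
--
-- 	score = 0
-- 	goal_states = [[1, 2, 3, 4], [5, 6, 7, 8], [9, 10, 11, 0]]
-- 	goal_coord = dict( (j,(x, y)) for x, i in enumerate(goal_states) for y, j in enumerate(i) )
--
-- 	for row_num, row in enumerate(state):
-- 		for col_num, tile in enumerate(row):
-- 			if tile != 0:
-- 				a = (row_num, col_num)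
-- 				b = goal_coord[tile]
-- 				score += max(abs(a[0]-b[0]), abs(a[1]-b[1]))
-- 	return score
-- ===== SOURCE B (Python) =====
-- _GOAL = (1, 2, 3, 4, 5, 6, 7, 8, 9, 10, 11, 0)
--
--
-- def manh_dist(state):
-- 	"""
-- 	First heuristic function, computes the Manhattan distance in terms of the array indices as x-y coordinates
-- 	"""
-- 	score = 0
-- 	tiles = {t for row in state for t in row} - {0}
-- 	for t in tiles:
-- 		gx, gy = divmod(_GOAL.index(t), 4)
-- 		score += sum(max(abs(r - gx), abs(c - gy))
-- 		             for r, row in enumerate(state)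
-- 		             for c, u in enumerate(row)
-- 		             if u == t)
-- 	return score
-- ===== Notes on version B (the rewrite author's own statement) =====
-- stated objective: alternative
-- what changed: B inverts the traversal: instead of A's single cell-major pass looking every tile up in a precomputed goal_coord dict built from the goal board, B collects the distinct non-zero tiles present as a set, and for each such tile locates its goal slot once via the flat solved tuple's .index split by divmod and adds up the distances of that tile's occurrences in the state.
import Mathlib
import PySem

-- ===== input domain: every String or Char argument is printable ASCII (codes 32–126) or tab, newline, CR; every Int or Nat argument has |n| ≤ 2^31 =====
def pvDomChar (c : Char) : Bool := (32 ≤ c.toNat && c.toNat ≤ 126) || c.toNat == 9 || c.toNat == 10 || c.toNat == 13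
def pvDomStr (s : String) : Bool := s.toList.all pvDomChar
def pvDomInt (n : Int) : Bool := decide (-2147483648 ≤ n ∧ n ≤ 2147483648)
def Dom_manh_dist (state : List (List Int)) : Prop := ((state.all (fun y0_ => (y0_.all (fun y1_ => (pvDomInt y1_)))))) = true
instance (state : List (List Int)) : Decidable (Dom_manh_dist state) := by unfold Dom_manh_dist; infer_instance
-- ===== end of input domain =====

-- B drops A's goal board and goal_coord dict: it loops tile-major over the distinct tiles present,
-- locating each tile's goal slot once by index+divmod and summing its occurrences (objective: alternative traversal).


-- ===== PORT A =====
-- A-side helpers: the goal board and the dict built from it, as A builds them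
def pvGoalStates : List (List Int) := [[1, 2, 3, 4], [5, 6, 7, 8], [9, 10, 11, 0]]

def pvGoalCoord : PySem.Dict Int (Int × Int) :=
  (PySem.List.enumerate pvGoalStates).foldl
    (fun d xi =>
      (PySem.List.enumerate xi.2).foldl (fun d yj => d.insert yj.2 (xi.1, yj.1)) d)
    PySem.Dict.empty

def manh_dist (state : List (List Int)) : Int :=
  (PySem.List.enumerate state).foldl
    (fun score rr =>
      (PySem.List.enumerate rr.2).foldl
        (fun score ct =>
          if ct.2 ≠ 0 then
            let a := (rr.1, ct.1)
            -- goal_coord[tile]: KeyError (get? = none) is excluded by Pre_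
            let b := (pvGoalCoord.get? ct.2).getD (0, 0)
            score + max |a.1 - b.1| |a.2 - b.2|
          else score)
        score)
    0

-- ===== PORT B =====
-- B-side helpers: the flat solved board and a tile's goal slot in it
def pvGoal : List Int := [1, 2, 3, 4, 5, 6, 7, 8, 9, 10, 11, 0]

-- _GOAL.index(t): ValueError (index? = none) is excluded by Pre_
def pvIdx (t : Int) : Int := ((PySem.List.index? pvGoal t).getD 0 : Nat)

def manh_dist_alt (state : List (List Int)) : Int :=
  let tiles : PySem.Set Int :=
    PySem.Set.diff (PySem.Set.ofList (state.flatMap (fun row => row))) (PySem.Set.ofList [0])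
  tiles.foldl
    (fun score t =>
      let gx := PySem.Int.floordiv (pvIdx t) 4
      let gy := PySem.Int.mod (pvIdx t) 4
      score +
        ((PySem.List.enumerate state).flatMap
          (fun rr =>
            (PySem.List.enumerate rr.2).filterMap
              (fun ct =>
                if ct.2 = t then some (max |rr.1 - gx| |ct.1 - gy|) else none))).sum)
    0

-- ===== PRECONDITION & SPEC =====
-- Pre_ excludes exactly the states with a non-zero tile outside 1..11, on which A's
-- goal_coord lookup raises KeyError (and B's tuple.index raises ValueError).
def Pre_manh_dist (state : List (List Int)) : Prop :=
  ∀ row ∈ state, ∀ t ∈ row, 0 ≤ t ∧ t ≤ 11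
instance (state : List (List Int)) : Decidable (Pre_manh_dist state) := by
  unfold Pre_manh_dist; infer_instance

def pvWitness_manh_dist : List (List Int) := [[1, 0, 3, 4], [5, 2, 7, 8], [9, 10, 11, 6]]

def Spec_manh_dist (state : List (List Int)) (out : Int) : Prop := out = manh_dist_alt state
instance (state : List (List Int)) (out : Int) : Decidable (Spec_manh_dist state out) := by
  unfold Spec_manh_dist; infer_instance

-- ===== CLAIM (what is proved, stated in full; the proofs are below) =====
def Claim_equal_manh_dist : Prop :=
  ∀ (state : List (List Int)), Dom_manh_dist state → Pre_manh_dist state →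
    Spec_manh_dist state (manh_dist state)

-- ===== LEMMAS AND PROOFS =====

-- distance of a cell (r, c) from the goal cell of slot g
def pvD (r c g : Int) : Int :=
  max |r - PySem.Int.floordiv g 4| |c - PySem.Int.mod g 4|

-- the cell list of a state: (row index, column index, tile)
def pvCells (state : List (List Int)) : List (Int × Int × Int) :=
  (PySem.List.enumerate state).flatMap
    (fun rr => (PySem.List.enumerate rr.2).map (fun ct => (rr.1, ct.1, ct.2)))

-- A's coordinate-dict lookup is the closed-form divmod position, on every legal non-zero tile
lemma pvCoord_eq (t : Int) (h0 : 0 ≤ t) (h1 : t ≤ 11) (hne : t ≠ 0) :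
    (pvGoalCoord.get? t).getD (0, 0) =
      (PySem.Int.floordiv (t - 1) 4, PySem.Int.mod (t - 1) 4) := by
  interval_cases t <;> simp_all <;> decide

-- B's goal slot of a legal non-zero tile is t - 1
lemma pvIdx_eq (t : Int) (h0 : 1 ≤ t) (h1 : t ≤ 11) : pvIdx t = t - 1 := by
  interval_cases t <;> decide

-- A's inner loop, shifted by the accumulator, as a filterMap sum with closed-form coordinates
lemma pvInnerA (row : List Int) (r : Int) : ∀ (c score : Int),
    (∀ t ∈ row, 0 ≤ t ∧ t ≤ 11) →
    (PySem.List.enumerate row c).foldl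
        (fun score ct =>
          if ct.2 ≠ 0 then
            score + max |r - ((pvGoalCoord.get? ct.2).getD (0, 0)).1|
                        |ct.1 - ((pvGoalCoord.get? ct.2).getD (0, 0)).2|
          else score)
        score
      = score + ((PySem.List.enumerate row c).filterMap
          (fun ct => if ct.2 ≠ 0 then some (pvD r ct.1 (ct.2 - 1)) else none)).sum := by
  induction row with
  | nil => intro c score _; simp [PySem.List.enumerate]
  | cons t ts ih =>
    intro c score hpre
    have ht := hpre t (by simp)
    have hrest : ∀ t ∈ ts, 0 ≤ t ∧ t ≤ 11 := fun x hx => hpre x (by simp [hx])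
    by_cases h : t = 0
    · subst h
      simp only [PySem.List.enumerate, List.foldl_cons, List.filterMap_cons]
      simpa using ih (c + 1) score hrest
    · have hc := pvCoord_eq t ht.1 ht.2 h
      simp only [PySem.List.enumerate, List.foldl_cons, List.filterMap_cons, h,
        if_pos, ne_eq, not_false_iff, hc]
      rw [ih (c + 1) _ hrest]
      simp [pvD]
      ring

-- A's outer loop, shifted by the accumulator, as the sum of the per-cell distances
lemma pvOuterA (state : List (List Int)) : ∀ (r score : Int),
    Pre_manh_dist state →
    (PySem.List.enumerate state r).foldl
        (fun score rr =>
          (PySem.List.enumerate rr.2).foldl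
            (fun score ct =>
              if ct.2 ≠ 0 then
                let a := (rr.1, ct.1)
                let b := (pvGoalCoord.get? ct.2).getD (0, 0)
                score + max |a.1 - b.1| |a.2 - b.2|
              else score)
            score)
        score
      = score + ((PySem.List.enumerate state r).flatMap
          (fun rr =>
            (PySem.List.enumerate rr.2).filterMap
              (fun ct =>
                if ct.2 ≠ 0 then some (pvD rr.1 ct.1 (ct.2 - 1)) else none))).sum := by
  induction state with
  | nil => intro r score _; simp [PySem.List.enumerate]
  | cons row rows ih =>
    intro r score hpre
    have hrow : ∀ t ∈ row, 0 ≤ t ∧ t ≤ 11 := hpre row (by simp)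
    have hrest : Pre_manh_dist rows := fun x hx => hpre x (by simp [hx])
    simp only [PySem.List.enumerate, List.foldl_cons, List.flatMap_cons]
    rw [pvInnerA row r 0 score hrow, ih (r + 1) _ hrest]
    simp [List.sum_append]
    ring

-- a filterMap over the two enumerate loops is the same filterMap over the cell list
lemma pvCells_fm (state : List (List Int)) (f : Int × Int × Int → Option Int) :
    (pvCells state).filterMap f
      = (PySem.List.enumerate state).flatMap
          (fun rr => (PySem.List.enumerate rr.2).filterMap (fun ct => f (rr.1, ct.1, ct.2))) := by
  simp [pvCells, List.filterMap_flatMap, List.filterMap_map, Function.comp]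

-- sum of a filterMap with a some/none if, cons step
lemma pvFMConsSum {α : Type} (f : α → Option Int) (a : α) (l : List α) :
    ((a :: l).filterMap f).sum = (f a).getD 0 + (l.filterMap f).sum := by
  cases h : f a <;> simp [h]

-- over a duplicate-free list, the indicator sum picks out membership
lemma pvSumIndicator (L : List Int) (a v : Int) (hnd : L.Nodup) :
    (L.map (fun t => if a = t then v else 0)).sum = if a ∈ L then v else 0 := by
  induction L with
  | nil => simp
  | cons b bs ih =>
    rw [List.nodup_cons] at hnd
    rw [List.map_cons, List.sum_cons, ih hnd.2]
    by_cases h : a = b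
    · subst h
      simp [hnd.1]
    · simp [h]

-- tile-major sums over a duplicate-free tile list covering the cells = the cell-major sum
lemma pvPartition (L : List Int) (f : Int → Int → Int → Int) :
    ∀ (cs : List (Int × Int × Int)), L.Nodup → (∀ t ∈ L, t ≠ 0) →
    (∀ x ∈ cs, x.2.2 ≠ 0 → x.2.2 ∈ L) →
    (L.map (fun t =>
        (cs.filterMap (fun x => if x.2.2 = t then some (f x.1 x.2.1 t) else none)).sum)).sum
      = (cs.filterMap (fun x => if x.2.2 ≠ 0 then some (f x.1 x.2.1 x.2.2) else none)).sum := by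
  intro cs hnd h0
  induction cs with
  | nil => intro _; simp
  | cons x xs ih =>
    intro hmem
    have hx := hmem x (by simp)
    have hxs : ∀ y ∈ xs, y.2.2 ≠ 0 → y.2.2 ∈ L := fun y hy => hmem y (by simp [hy])
    have h1 : ∀ t ∈ L,
        (((x :: xs).filterMap (fun y => if y.2.2 = t then some (f y.1 y.2.1 t) else none)).sum)
          = (if x.2.2 = t then f x.1 x.2.1 x.2.2 else 0)
            + ((xs.filterMap (fun y => if y.2.2 = t then some (f y.1 y.2.1 t) else none)).sum) := by
      intro t _
      rw [pvFMConsSum]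
      by_cases h : x.2.2 = t
      · subst h; simp
      · simp [h]
    rw [List.map_congr_left h1, PySem.List.sum_map_add_int, ih hxs,
      pvSumIndicator L x.2.2 (f x.1 x.2.1 x.2.2) hnd, pvFMConsSum]
    by_cases h : x.2.2 = 0
    · have : (0 : Int) ∉ L := fun hmem0 => (h0 0 hmem0) rfl
      simp [h, this]
    · simp [h, hx h]

-- every tile of a cell is a tile of the state
lemma pvCells_tile_mem (state : List (List Int)) :
    ∀ x ∈ pvCells state, x.2.2 ∈ state.flatMap (fun row => row) := by
  intro x hx
  simp only [pvCells, List.mem_flatMap, List.mem_map] at hx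
  obtain ⟨rr, hrr, ct, hct, rfl⟩ := hx
  rw [PySem.List.mem_enumerate_iff] at hrr hct
  obtain ⟨k, hk, rfl⟩ := hrr
  obtain ⟨j, hj, rfl⟩ := hct
  exact List.mem_flatMap.2 ⟨state[k], List.getElem_mem hk, List.getElem_mem hj⟩

-- ===== VERDICT (by name: the statement is the Claim_ definition above) =====
theorem manh_dist_spec : Claim_equal_manh_dist := by
  intro state _ hpre
  unfold Spec_manh_dist manh_dist
  rw [pvOuterA state 0 0 hpre]
  simp only [manh_dist_alt]
  -- B's distinct-tile list and its properties
  set L : List Int :=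
    PySem.Set.diff (PySem.Set.ofList (state.flatMap (fun row => row))) (PySem.Set.ofList [0])
    with hL
  have hnd : L.Nodup := PySem.Set.nodup_diff _ _ (PySem.Set.nodup_ofList _)
  have hmemL : ∀ t : Int, t ∈ L ↔ t ∈ state.flatMap (fun row => row) ∧ t ≠ 0 := by
    intro t
    rw [hL, PySem.Set.mem_diff]
    simp [PySem.Set.mem_ofList]
  have h0 : ∀ t ∈ L, t ≠ 0 := fun t ht => ((hmemL t).1 ht).2
  have hbound : ∀ x ∈ pvCells state, 0 ≤ x.2.2 ∧ x.2.2 ≤ 11 := by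
    intro x hx
    obtain ⟨row, hrow, ht'⟩ := List.mem_flatMap.1 (pvCells_tile_mem state x hx)
    exact hpre row hrow x.2.2 ht'
  have hmemc : ∀ x ∈ pvCells state, x.2.2 ≠ 0 → x.2.2 ∈ L :=
    fun x hx hne => (hmemL _).2 ⟨pvCells_tile_mem state x hx, hne⟩
  -- B's fold as a mapped sum over L
  rw [PySem.List.foldl_add
    (g := fun t => ((PySem.List.enumerate state).flatMap
      (fun rr => (PySem.List.enumerate rr.2).filterMap
        (fun ct => if ct.2 = t then
          some (max |rr.1 - PySem.Int.floordiv (pvIdx t) 4|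
                    |ct.1 - PySem.Int.mod (pvIdx t) 4|) else none))).sum)]
  -- both comprehensions through the cell list
  have hA : ((PySem.List.enumerate state).flatMap
      (fun rr => (PySem.List.enumerate rr.2).filterMap
        (fun ct => if ct.2 ≠ 0 then some (pvD rr.1 ct.1 (ct.2 - 1)) else none)))
      = (pvCells state).filterMap
          (fun x => if x.2.2 ≠ 0 then some (pvD x.1 x.2.1 (x.2.2 - 1)) else none) := by
    rw [pvCells_fm]
  have hB : ∀ t : Int, ((PySem.List.enumerate state).flatMap
      (fun rr => (PySem.List.enumerate rr.2).filterMap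
        (fun ct => if ct.2 = t then
          some (max |rr.1 - PySem.Int.floordiv (pvIdx t) 4|
                    |ct.1 - PySem.Int.mod (pvIdx t) 4|) else none)))
      = (pvCells state).filterMap
          (fun x => if x.2.2 = t then some (pvD x.1 x.2.1 (pvIdx t)) else none) := by
    intro t
    rw [pvCells_fm]
    rfl
  -- the pvIdx form of A's sum: pvIdx t = t - 1 on every admitted non-zero tile
  have hAc : ((pvCells state).filterMap
      (fun x => if x.2.2 ≠ 0 then some (pvD x.1 x.2.1 (x.2.2 - 1)) else none))
      = (pvCells state).filterMap
          (fun x => if x.2.2 ≠ 0 then some (pvD x.1 x.2.1 (pvIdx x.2.2)) else none) := by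
    refine List.filterMap_congr (fun x hx => ?_)
    by_cases h : x.2.2 = 0
    · simp [h]
    · have hb := hbound x hx
      rw [pvIdx_eq x.2.2 (by omega) hb.2]
  have hmap : (L.map (fun t => ((PySem.List.enumerate state).flatMap
      (fun rr => (PySem.List.enumerate rr.2).filterMap
        (fun ct => if ct.2 = t then
          some (max |rr.1 - PySem.Int.floordiv (pvIdx t) 4|
                    |ct.1 - PySem.Int.mod (pvIdx t) 4|) else none))).sum))
      = L.map (fun t => ((pvCells state).filterMap
          (fun x => if x.2.2 = t then some (pvD x.1 x.2.1 (pvIdx t)) else none)).sum) :=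
    List.map_congr_left (fun t _ => by rw [hB t])
  rw [hA, hAc, hmap,
    pvPartition L (fun r c t => pvD r c (pvIdx t)) (pvCells state) hnd h0 hmemc]
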